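-- pv_equiv track=rewrite | github.com/apache/incubator-heron | integration_test/src/python/integration_test/topology/dsl/word_count_dsl.py | _calculate_stage_name
-- ===== SOURCE A (Python) =====
-- def _calculate_stage_name(existing_stage_names):
--   stagename = "fixedlines"
--   if stagename not in existing_stage_names:
--     return stagename
--   else:
--     index = 1
--     newname = stagename + str(index)
--     while newname in existing_stage_names:
--       index = index + 1
--       newname = stagename + str(index)
--     return newname
-- ===== SOURCE B (Python) =====
-- def _calculate_stage_name(existing_stage_names):
--   base = "fixedlines"
--   n = len(existing_stage_names)
--   # inverted index: candidate name -> slot (slot 0 = bare base, slot k >= 1 = base + str(k))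
--   slot_of = {base: 0}
--   for k in range(1, n + 2):
--     slot_of[base + str(k)] = k
--   # one pass over the names, marking the slots they occupy
--   used = [False] * (n + 2)
--   for name in existing_stage_names:
--     k = slot_of.get(name)
--     if k is not None:
--       used[k] = True
--   # first unmarked slot; n names occupy at most n of the n + 2 slots
--   k = 0
--   while used[k]:
--     k = k + 1
--   return base if k == 0 else base + str(k)
-- ===== Notes on version B (the rewrite author's own statement) =====
-- stated objective: alternative
-- what changed: Instead of probing candidate names one by one against the collection, B builds an inverted index from candidate name to slot number, marks in one pass over the input which slots are occupied, and returns the first unmarked slot (a mex computation).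
import Mathlib
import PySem

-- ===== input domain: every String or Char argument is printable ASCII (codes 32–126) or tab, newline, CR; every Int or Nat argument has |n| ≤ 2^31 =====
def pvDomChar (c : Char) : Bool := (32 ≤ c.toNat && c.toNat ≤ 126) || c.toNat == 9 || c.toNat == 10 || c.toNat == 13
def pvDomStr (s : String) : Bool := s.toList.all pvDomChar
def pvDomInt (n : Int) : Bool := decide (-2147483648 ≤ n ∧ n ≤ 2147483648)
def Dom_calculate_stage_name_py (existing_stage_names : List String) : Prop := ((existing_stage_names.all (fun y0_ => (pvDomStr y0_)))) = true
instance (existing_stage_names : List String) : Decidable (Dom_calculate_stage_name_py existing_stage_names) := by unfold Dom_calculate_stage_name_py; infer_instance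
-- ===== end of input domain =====

-- B replaces A's candidate probing (try "fixedlines", "fixedlines1", … against the collection)
-- by an inverted index: a dict from candidate name to slot number, one marking pass over the
-- names, and a scan of the mark table for the first free slot (objective: alternative algorithm).
-- Both while-loops are fuelled; the fuel is proved sufficient, so the exhaustion branch is never
-- the one that decides the result.

-- ===== PORT A =====
-- A's while loop: index starts at 1, newname = "fixedlines" + str(index); loop while taken
def pvLoopA (xs : List String) (index : Int) : Nat → String
  | 0 => "fixedlines" ++ PySem.Int.toStr index
  | n+1 =>
    let newname := "fixedlines" ++ PySem.Int.toStr index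
    if xs.contains newname then pvLoopA xs (index + 1) n else newname

def calculate_stage_name_py (existing_stage_names : List String) : String :=
  if existing_stage_names.contains "fixedlines" then
    pvLoopA existing_stage_names 1 existing_stage_names.length
  else
    "fixedlines"

-- ===== PORT B =====
-- slot_of = {base: 0}; for k in range(1, n+2): slot_of[base + str(k)] = k
def pvSlotOf (n : Nat) : PySem.Dict String Int :=
  (PySem.List.pyRange 1 ((n : Int) + 2) 1).foldl
    (fun d k => d.insert ("fixedlines" ++ PySem.Int.toStr k) k)
    (PySem.Dict.ofList [("fixedlines", (0 : Int))])

-- used = [False]*(n+2); for name in xs: k = slot_of.get(name); if k is not None: used[k] = True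
def pvStep (slot : PySem.Dict String Int) (u : List Bool) (name : String) : List Bool :=
  match slot.get? name with
  | some k => PySem.List.pySetD u k true
  | none => u

def pvMarkUsed (slot : PySem.Dict String Int) (xs : List String) (n : Nat) : List Bool :=
  xs.foldl (pvStep slot) (List.replicate (n + 2) false)

-- k = 0; while used[k]: k = k + 1; return base if k == 0 else base + str(k)
def pvScanB (u : List Bool) : Int → Nat → String
  | k, 0 => if k = 0 then "fixedlines" else "fixedlines" ++ PySem.Int.toStr k
  | k, f+1 =>
    if PySem.List.pyGetD u k false then pvScanB u (k + 1) f
    else if k = 0 then "fixedlines" else "fixedlines" ++ PySem.Int.toStr k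

def calculate_stage_name_py_alt (existing_stage_names : List String) : String :=
  let n := existing_stage_names.length
  pvScanB (pvMarkUsed (pvSlotOf n) existing_stage_names n) 0 (n + 2)

-- ===== PRECONDITION & SPEC =====
def Spec_calculate_stage_name_py (existing_stage_names : List String) (out : String) : Prop := out = calculate_stage_name_py_alt existing_stage_names
instance (existing_stage_names : List String) (out : String) : Decidable (Spec_calculate_stage_name_py existing_stage_names out) := by unfold Spec_calculate_stage_name_py; infer_instance

-- ===== CLAIM (what is proved, stated in full; the proofs are below) =====
def Claim_equal_calculate_stage_name_py : Prop := ∀ (existing_stage_names : List String), Dom_calculate_stage_name_py existing_stage_names → Spec_calculate_stage_name_py existing_stage_names (calculate_stage_name_py existing_stage_names)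

-- ===== LEMMAS AND PROOFS =====

-- decimal decoding: value of a digit string produced by Nat.toDigitsCore
def pvDec (cs : List Char) : Nat := cs.foldl (fun a c => 10 * a + (c.toNat - 48)) 0

theorem pv_core_append (b : Nat) : ∀ (f n : Nat) (acc : List Char),
    Nat.toDigitsCore b f n acc = Nat.toDigitsCore b f n [] ++ acc := by
  intro f
  induction f with
  | zero => intro n acc; simp [Nat.toDigitsCore]
  | succ f ih =>
    intro n acc
    simp only [Nat.toDigitsCore]
    by_cases h : n / b = 0
    · simp [h]
    · simp only [h, if_false]
      rw [ih (n / b) ((n % b).digitChar :: acc), ih (n / b) [(n % b).digitChar]]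
      simp

theorem pv_digitChar_sub (d : Nat) (h : d < 10) : (Nat.digitChar d).toNat - 48 = d := by
  interval_cases d <;> decide

theorem pv_dec_core : ∀ (f n : Nat), n < f → pvDec (Nat.toDigitsCore 10 f n []) = n := by
  intro f
  induction f with
  | zero => omega
  | succ f ih =>
    intro n hn
    simp only [Nat.toDigitsCore]
    by_cases h : n / 10 = 0
    · have h10 : n < 10 := by omega
      simp [h, pvDec, Nat.mod_eq_of_lt h10]
      exact pv_digitChar_sub n h10
    · have hlt : n / 10 < f := by
        have := Nat.div_lt_self (by omega : 0 < n) (by omega : 1 < 10)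
        omega
      simp only [h, if_false]
      rw [pv_core_append 10 f (n / 10) [(n % 10).digitChar]]
      simp only [pvDec, List.foldl_append] at *
      rw [ih (n / 10) hlt]
      have := pv_digitChar_sub (n % 10) (Nat.mod_lt _ (by omega))
      simp only [List.foldl]
      omega

theorem pv_toDigits_inj {m n : Nat} (h : Nat.toDigits 10 m = Nat.toDigits 10 n) : m = n := by
  have hm := pv_dec_core (m + 1) m (by omega)
  have hn := pv_dec_core (n + 1) n (by omega)
  unfold Nat.toDigits at h
  rw [h, hn] at hm
  omega

theorem pv_toDigits_ne_nil (n : Nat) : Nat.toDigits 10 n ≠ [] := by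
  unfold Nat.toDigits
  simp only [Nat.toDigitsCore]
  by_cases h : n / 10 = 0
  · simp [h]
  · simp only [h, if_false]
    rw [pv_core_append 10 n (n / 10) [(n % 10).digitChar]]
    simp

theorem pv_toChars_nonneg (i : Int) (h : 0 ≤ i) :
    PySem.Int.toChars i = Nat.toDigits 10 i.toNat := by
  simp [PySem.Int.toChars, not_lt.mpr h]

-- the candidate in slot j
def pvCand (j : Nat) : String := if j = 0 then "fixedlines" else "fixedlines" ++ PySem.Int.toStr (j : Int)

theorem pv_toChars_eq_iff {i j : Int} (hi : 0 ≤ i) (hj : 0 ≤ j)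
    (h : PySem.Int.toChars i = PySem.Int.toChars j) : i = j := by
  rw [pv_toChars_nonneg i hi, pv_toChars_nonneg j hj] at h
  have := pv_toDigits_inj h
  omega

theorem pv_toStr_eq_iff {i j : Int} (hi : 0 ≤ i) (hj : 0 ≤ j)
    (h : PySem.Int.toStr i = PySem.Int.toStr j) : i = j := by
  have hl : (PySem.Int.toStr i).toList = (PySem.Int.toStr j).toList := by rw [h]
  rw [PySem.Int.toList_toStr, PySem.Int.toList_toStr] at hl
  exact pv_toChars_eq_iff hi hj hl

theorem pv_base_ne_cand (j : Nat) (hj : j ≠ 0) :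
    "fixedlines" ≠ "fixedlines" ++ PySem.Int.toStr (j : Int) := by
  intro h
  have hl : ("fixedlines" : String).toList = ("fixedlines" ++ PySem.Int.toStr (j : Int)).toList := by rw [← h]
  rw [String.toList_append, PySem.Int.toList_toStr, pv_toChars_nonneg _ (by omega)] at hl
  have hlen : (("fixedlines" : String).toList).length
      = (("fixedlines" : String).toList ++ Nat.toDigits 10 (Int.toNat j)).length := by rw [← hl]
  rw [List.length_append] at hlen
  cases hd : Nat.toDigits 10 (Int.toNat j) with
  | nil => exact pv_toDigits_ne_nil (Int.toNat j) hd
  | cons c cs => rw [hd, List.length_cons] at hlen; omega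

theorem pv_cand_inj : Function.Injective pvCand := by
  intro a b h
  unfold pvCand at h
  by_cases ha : a = 0 <;> by_cases hb : b = 0
  · omega
  · rw [if_pos ha, if_neg hb] at h; exact absurd h (pv_base_ne_cand b hb)
  · rw [if_neg ha, if_pos hb] at h; exact absurd h.symm (pv_base_ne_cand a ha)
  · rw [if_neg ha, if_neg hb] at h
    have hl := congrArg String.toList h
    rw [String.toList_append, String.toList_append] at hl
    have h2 : PySem.Int.toStr (a : Int) = PySem.Int.toStr (b : Int) :=
      String.ext (List.append_cancel_left hl)
    have := pv_toStr_eq_iff (by omega) (by omega) h2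
    omega

-- slot_of characterization
theorem pv_slotOf_items (n : Nat) :
    (pvSlotOf n).items = ("fixedlines", (0 : Int)) ::
      (PySem.List.pyRange 1 ((n : Int) + 2) 1).map (fun k => ("fixedlines" ++ PySem.Int.toStr k, k)) := by
  unfold pvSlotOf
  rw [PySem.Dict.items_foldl_insert_fresh _ _ _ _ ?fresh ?nodup]
  · rfl
  case fresh =>
    intro a ha
    rw [PySem.List.mem_pyRange_one] at ha
    rw [PySem.Dict.contains_eq_decide_mem_keys]
    simp only [decide_eq_false_iff_not]
    have hk : (PySem.Dict.ofList [(("fixedlines" : String), (0 : Int))]).keys = ["fixedlines"] := by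
      decide
    rw [hk, List.mem_singleton]
    intro heq
    have ha1 : a = ((a.toNat : Nat) : Int) := by omega
    rw [ha1] at heq
    exact pv_base_ne_cand a.toNat (by omega) heq.symm
  case nodup =>
    apply List.Nodup.map_on
    · intro x hx y hy hxy
      rw [PySem.List.mem_pyRange_one] at hx hy
      have h2 : PySem.Int.toChars x = PySem.Int.toChars y := by
        have := congrArg String.toList hxy
        simpa [String.toList_append, PySem.Int.toList_toStr] using this
      exact pv_toChars_eq_iff (by omega) (by omega) h2
    · exact PySem.List.nodup_pyRange_one 1 ((n : Int) + 2)

theorem pv_keys_nodup (n : Nat) : (pvSlotOf n).keys.Nodup := by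
  unfold pvSlotOf
  apply PySem.Dict.nodup_keys_foldl_insert_key
  decide

theorem pv_get?_slotOf (n : Nat) (j : Nat) (hj : j ≤ n + 1) :
    (pvSlotOf n).get? (pvCand j) = some (j : Int) := by
  apply PySem.Dict.get?_of_mem_items _ _ (pv_keys_nodup n)
  rw [pv_slotOf_items]
  by_cases hz : j = 0
  · subst hz; simp [pvCand]
  · right
    refine List.mem_map.mpr ⟨(j : Int), ?_, ?_⟩
    · rw [PySem.List.mem_pyRange_one]; omega
    · simp [pvCand, hz]

theorem pv_get?_slotOf_eq (n : Nat) {name : String} {k : Int}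
    (h : (pvSlotOf n).get? name = some k) :
    ∃ j : Nat, j ≤ n + 1 ∧ k = (j : Int) ∧ name = pvCand j := by
  have hmem := PySem.Dict.mem_items_of_get?_eq_some _ h
  rw [pv_slotOf_items] at hmem
  rcases List.mem_cons.mp hmem with h0 | hm
  · have h1 : name = "fixedlines" := ((Prod.mk.injEq _ _ _ _).mp h0).1
    have h2 : k = 0 := ((Prod.mk.injEq _ _ _ _).mp h0).2
    exact ⟨0, by omega, by omega, by simp [pvCand, h1]⟩
  · rcases List.mem_map.mp hm with ⟨a, hain, heq⟩
    rw [PySem.List.mem_pyRange_one] at hain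
    have h1 : name = "fixedlines" ++ PySem.Int.toStr a := ((Prod.mk.injEq _ _ _ _).mp heq).1.symm
    have h2 : k = a := ((Prod.mk.injEq _ _ _ _).mp heq).2.symm
    refine ⟨a.toNat, by omega, by omega, ?_⟩
    have ha : ((a.toNat : Nat) : Int) = a := by omega
    rw [pvCand, if_neg (by omega : ¬ a.toNat = 0), ha]
    exact h1

-- the mark table: slot j is marked iff its candidate occurs among the names
theorem pv_setD_set (u : List Bool) (k : Nat) (v : Bool) (h : k < u.length) :
    PySem.List.pySetD u (k : Int) v = u.set k v := by
  simp [PySem.List.pySetD, PySem.List.pySet?, PySem.List.pyIdx?, h]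

theorem pv_mark_aux (n : Nat) : ∀ (l : List String) (u : List Bool), u.length = n + 2 →
    ∀ j : Nat, j ≤ n + 1 →
    (l.foldl (pvStep (pvSlotOf n)) u).getD j false = (u.getD j false || l.contains (pvCand j)) := by
  intro l
  induction l with
  | nil => intro u hu j hj; simp
  | cons name l ih =>
    intro u hu j hj
    rw [List.foldl_cons]
    cases hmatch : (pvSlotOf n).get? name with
    | none =>
      have hstep : pvStep (pvSlotOf n) u name = u := by
        simp only [pvStep, hmatch]
      rw [hstep, ih u hu j hj]
      have hne : name ≠ pvCand j := by
        intro h; rw [h, pv_get?_slotOf n j hj] at hmatch; simp at hmatch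
      simp [Ne.symm hne]
    | some k =>
      rcases pv_get?_slotOf_eq n hmatch with ⟨j', hj', hk, hname⟩
      subst hk
      have hlen : j' < u.length := by omega
      have hstep : pvStep (pvSlotOf n) u name = u.set j' true := by
        simp only [pvStep, hmatch]
        exact pv_setD_set u j' true hlen
      rw [hstep, ih _ (by simp [hu]) j hj]
      by_cases hjj : j = j'
      · subst hjj
        have hset : (u.set j true).getD j false = true := by
          simp [List.getD, hlen]
        rw [hset]
        have hcons : (name :: l).contains (pvCand j) = true := by
          simp [hname]
        rw [hcons]
        simp
      · have hset : (u.set j' true).getD j false = u.getD j false := by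
          simp [List.getD, Ne.symm hjj]
        rw [hset]
        have hne : name ≠ pvCand j := by
          rw [hname]; intro h; exact hjj (pv_cand_inj h).symm
        simp [Ne.symm hne]

theorem pv_used_getD (xs : List String) (j : Nat) (hj : j ≤ xs.length + 1) :
    (pvMarkUsed (pvSlotOf xs.length) xs xs.length).getD j false = xs.contains (pvCand j) := by
  unfold pvMarkUsed
  rw [pv_mark_aux xs.length xs (List.replicate (xs.length + 2) false) (by simp) j hj]
  simp

-- existence of a free slot among 0..n (pigeonhole: the candidates are pairwise distinct)
theorem pv_exists_free (xs : List String) : ∃ j : Nat, j ≤ xs.length ∧ pvCand j ∉ xs := by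
  by_contra hc
  push Not at hc
  have hsub : ((List.range (xs.length + 1)).map pvCand) ⊆ xs := by
    intro x hx
    rcases List.mem_map.mp hx with ⟨j, hj, rfl⟩
    rw [List.mem_range] at hj
    exact hc j (by omega)
  have hnd : ((List.range (xs.length + 1)).map pvCand).Nodup :=
    (List.nodup_range).map pv_cand_inj
  have := (List.subperm_of_subset hnd hsub).length_le
  simp at this

theorem pv_exists_free' (xs : List String) : ∃ j : Nat, pvCand j ∉ xs := by
  rcases pv_exists_free xs with ⟨j, _, h⟩; exact ⟨j, h⟩

-- A's loop returns the candidate of the least free slot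
theorem pv_loopA_eq (xs : List String) (hex : ∃ j : Nat, pvCand j ∉ xs) :
    ∀ (f : Nat) (i : Nat), 1 ≤ i → i ≤ Nat.find hex → Nat.find hex ≤ i + f →
    pvLoopA xs (i : Int) f = pvCand (Nat.find hex) := by
  intro f
  induction f with
  | zero =>
    intro i h1 h2 h3
    have hi : i = Nat.find hex := by omega
    show "fixedlines" ++ PySem.Int.toStr (i : Int) = pvCand (Nat.find hex)
    rw [← hi, pvCand, if_neg (by omega : ¬ i = 0)]
  | succ f ih =>
    intro i h1 h2 h3
    simp only [pvLoopA]
    have hcand : ("fixedlines" : String) ++ PySem.Int.toStr (i : Int) = pvCand i := by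
      rw [pvCand, if_neg (by omega : ¬ i = 0)]
    by_cases hmem : pvCand i ∈ xs
    · have hcont : xs.contains ("fixedlines" ++ PySem.Int.toStr (i : Int)) = true := by
        rw [hcand]; simp [hmem]
      rw [hcont]
      simp only [if_true]
      have hne : i ≠ Nat.find hex := by
        intro h; rw [h] at hmem; exact (Nat.find_spec hex) hmem
      have hc : ((i : Int) + 1) = ((i + 1 : Nat) : Int) := by push_cast; ring
      rw [hc]
      exact ih (i + 1) (by omega) (by omega) (by omega)
    · have hle := Nat.find_min' hex hmem
      have hi : i = Nat.find hex := by omega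
      have hcont : xs.contains ("fixedlines" ++ PySem.Int.toStr (i : Int)) = false := by
        rw [hcand]; simp [hmem]
      rw [hcont]
      simp only [Bool.false_eq_true, if_false]
      rw [hcand, hi]

theorem pv_A_eq (xs : List String) :
    calculate_stage_name_py xs = pvCand (Nat.find (pv_exists_free' xs)) := by
  unfold calculate_stage_name_py
  have hex := pv_exists_free' xs
  rcases pv_exists_free xs with ⟨j0, hj0, hfree⟩
  have hfind_le : Nat.find hex ≤ j0 := Nat.find_min' hex hfree
  by_cases hmem : ("fixedlines" : String) ∈ xs
  · rw [(by simp [hmem] : xs.contains ("fixedlines" : String) = true)]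
    simp only [if_true]
    have hne : Nat.find hex ≠ 0 := by
      intro h
      have hspec := Nat.find_spec hex
      rw [h] at hspec
      exact hspec (by simpa [pvCand] using hmem)
    have h1 : ((1 : Nat) : Int) = (1 : Int) := by norm_cast
    rw [← h1]
    exact pv_loopA_eq xs hex xs.length 1 (by omega) (by omega) (by omega)
  · rw [(by simp [hmem] : xs.contains ("fixedlines" : String) = false)]
    simp only [Bool.false_eq_true, if_false]
    have hz : Nat.find hex = 0 := by
      have := Nat.find_min' hex (by simpa [pvCand] using hmem : pvCand 0 ∉ xs)
      omega
    rw [hz]; simp [pvCand]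

-- B's scan result expression is the candidate of the current slot
theorem pv_scan_ret (k : Nat) :
    (if (k : Int) = 0 then "fixedlines" else "fixedlines" ++ PySem.Int.toStr (k : Int)) = pvCand k := by
  simp only [pvCand]
  by_cases hz : k = 0
  · rw [if_pos (by simp [hz]), if_pos hz]
  · rw [if_neg (by simpa using hz), if_neg hz]

-- B's scan returns the candidate of the least free slot
theorem pv_scanB_eq (xs : List String) (hex : ∃ j : Nat, pvCand j ∉ xs)
    (hmu : Nat.find hex ≤ xs.length) :
    ∀ (f : Nat) (k : Nat), k ≤ Nat.find hex → Nat.find hex ≤ k + f →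
    pvScanB (pvMarkUsed (pvSlotOf xs.length) xs xs.length) (k : Int) f = pvCand (Nat.find hex) := by
  intro f
  induction f with
  | zero =>
    intro k h1 h2
    have hk : k = Nat.find hex := by omega
    show (if (k : Int) = 0 then "fixedlines" else "fixedlines" ++ PySem.Int.toStr (k : Int))
        = pvCand (Nat.find hex)
    rw [pv_scan_ret k, hk]
  | succ f ih =>
    intro k h1 h2
    simp only [pvScanB]
    have hread : PySem.List.pyGetD (pvMarkUsed (pvSlotOf xs.length) xs xs.length) (k : Int) false
        = xs.contains (pvCand k) := by
      rw [PySem.List.pyGetD_natCast]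
      exact pv_used_getD xs k (by omega)
    rw [hread]
    by_cases hmem : pvCand k ∈ xs
    · rw [(by simp [hmem] : xs.contains (pvCand k) = true)]
      simp only [if_true]
      have hne : k ≠ Nat.find hex := by
        intro h; rw [h] at hmem; exact (Nat.find_spec hex) hmem
      have hc : ((k : Int) + 1) = ((k + 1 : Nat) : Int) := by push_cast; ring
      rw [hc]
      exact ih (k + 1) (by omega) (by omega)
    · rw [(by simp [hmem] : xs.contains (pvCand k) = false)]
      simp only [Bool.false_eq_true, if_false]
      have hle := Nat.find_min' hex hmem
      have hk : k = Nat.find hex := by omega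
      rw [pv_scan_ret k, hk]

theorem pv_B_eq (xs : List String) :
    calculate_stage_name_py_alt xs = pvCand (Nat.find (pv_exists_free' xs)) := by
  have hex := pv_exists_free' xs
  rcases pv_exists_free xs with ⟨j0, hj0, hfree⟩
  have hfind_le : Nat.find hex ≤ j0 := Nat.find_min' hex hfree
  show pvScanB (pvMarkUsed (pvSlotOf xs.length) xs xs.length) 0 (xs.length + 2)
      = pvCand (Nat.find (pv_exists_free' xs))
  have h0 : ((0 : Nat) : Int) = (0 : Int) := by norm_cast
  rw [← h0]
  exact pv_scanB_eq xs hex (by omega) (xs.length + 2) 0 (by omega) (by omega)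

-- ===== VERDICT (by name: the statement is the Claim_ definition above) =====
theorem calculate_stage_name_py_spec : Claim_equal_calculate_stage_name_py := by
  intro xs _
  unfold Spec_calculate_stage_name_py
  rw [pv_A_eq, pv_B_eq]
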